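-- pv_equiv track=rewrite | github.com/dair-iitd/Conjunction-Splitting | utils/splitter.py | split_tree
-- ===== SOURCE A (Python) =====
-- def list_of_conjuncts(string):
--     # input - string of conjuncts. eg. "[SS] Ram [ES] and [SS] Shyam [ES]"
--     # output - list of conjuncts. eg. ["Ram", "Shyam"]
--
--     # conjuncts = re.findall('\[SS\](.+?)\[ES\]', string)
--     conjuncts=[]
--     string = string.split()
--     depth = 0
--     curr_conjunct=[]
--     coordinations=["and", "or", ",", "but"]
--     for word in string:
--         if depth==0 and word.lower() in coordinations:
--             continue
--         else:
--             curr_conjunct.append(word)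
--         if word=="[SS]":
--             depth+=1
--         elif word=="[ES]":
--             depth-=1
--             if depth==0:
--                 conjuncts.append(" ".join(curr_conjunct[1:-1]))
--                 curr_conjunct=[]
--
--     return conjuncts
--
-- def split_tree(tree, depth):
--     # splits an HC tree only at the specified depth and returns all resultant sentences in a list
--     # This function ASSUMES that the input tree is already split at all previous depths
--     sentences=[]
--     depth_token="[D"+str(depth)+"]"
--     # m = re.search('\[SS\](.+?)\[ES\]', tree)
--     # if m:
--     #     found = m.group(1)
--     # m = re.findall('\[D1\](.+?)\[D1\]', tree)
--     if depth_token not in tree: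
--         sentences = [tree]
--     else:
--         temp = tree.split(depth_token)
--         l = list_of_conjuncts(temp[1].strip())
--         for x in l:
--             sentences.append( temp[0] + x + depth_token.join(temp[2:]) )
--
--         new_sentences=[]
--         for s in sentences:
--             new_sentences.extend(split_tree(s,depth))
--         sentences = new_sentences
--         # ipdb.set_trace()
--
--     return sentences
-- ===== SOURCE B (Python) =====
-- def list_of_conjuncts(string):
--     # identical helper (same-module dependency of split_tree)
--     conjuncts=[]
--     string = string.split()
--     depth = 0
--     curr_conjunct=[]
--     coordinations=["and", "or", ",", "but"]
--     for word in string: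
--         if depth==0 and word.lower() in coordinations:
--             continue
--         else:
--             curr_conjunct.append(word)
--         if word=="[SS]":
--             depth+=1
--         elif word=="[ES]":
--             depth-=1
--             if depth==0:
--                 conjuncts.append(" ".join(curr_conjunct[1:-1]))
--                 curr_conjunct=[]
--     return conjuncts
--
-- def split_tree(tree, depth):
--     # iterative DFS with an explicit LIFO stack instead of recursion;
--     # children pushed in reversed order keep the original left-to-right order
--     depth_token = "[D" + str(depth) + "]"
--     results = []
--     stack = [tree]
--     while stack:
--         sent = stack.pop()
--         if depth_token not in sent:
--             results.append(sent)
--         else: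
--             temp = sent.split(depth_token)
--             l = list_of_conjuncts(temp[1].strip())
--             tail = depth_token.join(temp[2:])
--             for x in reversed(l):
--                 stack.append(temp[0] + x + tail)
--     return results
-- ===== Notes on version B (the rewrite author's own statement) =====
-- stated objective: alternative
-- what changed: A's recursive tree-splitting is replaced by an iterative DFS over an explicit LIFO stack (children pushed in reversed order to keep the left-to-right order, the joined tail hoisted out of the expansion loop); same values in the same order.
import Mathlib
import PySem

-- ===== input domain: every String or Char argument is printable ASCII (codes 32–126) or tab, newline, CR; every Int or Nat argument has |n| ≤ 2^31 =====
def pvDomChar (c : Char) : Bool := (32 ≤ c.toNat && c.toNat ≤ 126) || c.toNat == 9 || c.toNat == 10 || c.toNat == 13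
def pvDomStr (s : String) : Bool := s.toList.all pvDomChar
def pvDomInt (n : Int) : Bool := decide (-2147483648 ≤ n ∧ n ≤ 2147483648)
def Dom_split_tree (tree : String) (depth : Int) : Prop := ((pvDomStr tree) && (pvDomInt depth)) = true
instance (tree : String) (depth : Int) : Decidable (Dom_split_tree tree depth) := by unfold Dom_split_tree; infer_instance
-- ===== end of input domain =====

-- B replaces A's recursion by an iterative DFS over an explicit LIFO stack (children pushed in
-- reverse, the joined tail hoisted out of the expansion loop); same results in the same order.


-- ===== PORT A =====
-- shared same-module helper of both Source A and Source B (Source B carries an identical copy)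
def list_of_conjuncts (string : String) : List String :=
  (((PySem.Str.split₀ string).foldl
    (fun (st : List String × Int × List String) word =>
      if st.2.1 == 0 && (["and", "or", ",", "but"].contains (PySem.Str.lower word)) then st
      else
        let curr := st.2.2 ++ [word]
        if word == "[SS]" then (st.1, st.2.1 + 1, curr)
        else if word == "[ES]" then
          if st.2.1 - 1 == 0 then
            (st.1 ++ [PySem.Str.join " " (PySem.List.slice curr (some 1) (some (-1)))], st.2.1 - 1, ([] : List String))
          else (st.1, st.2.1 - 1, curr)
        else (st.1, st.2.1, curr))
    ([], 0, [])).1)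

-- A's recursion, with a fuel argument as a totality guard only: every expanded sentence is
-- strictly shorter than its parent, so fuel = len(tree)+1 is never exhausted on a real run.
def splitA_go (tok : String) (fuel : Nat) (t : String) : List String :=
  if PySem.Str.isIn tok t = false then [t]
  else
    match fuel with
    | 0 => []
    | fuel + 1 =>
      let temp := (PySem.Str.split? t tok).getD []   -- tok ≠ "", so split? is always `some`
      let l := list_of_conjuncts (PySem.Str.strip (PySem.List.pyGetD temp 1 ""))
      -- temp has ≥ 2 parts when tok occurs in t, so the index 1 (and 0 below) never fall back
      let sentences := l.map (fun x =>
        PySem.List.pyGetD temp 0 "" ++ x ++ PySem.Str.join tok (PySem.List.slice temp (some 2) none))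
      sentences.flatMap (fun s => splitA_go tok fuel s)

def split_tree (tree : String) (depth : Int) : List String :=
  splitA_go ("[D" ++ PySem.Int.toStr depth ++ "]") (tree.toList.length + 1) tree

-- ===== PORT B =====
-- The stack is a Lean list whose head is the top; each entry carries the same fuel counter as
-- port A (a totality guard only, decremented when a sentence is expanded).
def pvStackRel (s t : List (Nat × String)) : Prop :=
  Multiset.IsDershowitzMannaLT (↑(s.map Prod.fst) : Multiset Nat) (↑(t.map Prod.fst))

theorem pvStackRel_wf : WellFounded pvStackRel :=
  InvImage.wf (fun (s : List (Nat × String)) => (↑(s.map Prod.fst) : Multiset Nat))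
    Multiset.wellFounded_isDershowitzMannaLT

theorem foldl_cons_eq {α β : Type} (g : α → β) :
    ∀ (ys : List α) (st : List β), ys.foldl (fun st x => g x :: st) st = ys.reverse.map g ++ st := by
  intro ys
  induction ys with
  | nil => intro st; simp
  | cons y ys ih => intro st; simp [ih]

theorem pvStackRel_pop (p : Nat × String) (rest : List (Nat × String)) :
    pvStackRel rest (p :: rest) := by
  refine ⟨↑(rest.map Prod.fst), 0, {p.1}, by simp, by simp, ?_, by simp⟩
  simp only [List.map_cons, ← Multiset.cons_coe]
  rw [add_comm (G := Multiset Nat), Multiset.singleton_add]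

theorem pvStackRel_push (f : Nat) (sent : String) (g : String → String) (xs : List String)
    (rest : List (Nat × String)) :
    pvStackRel (xs.foldl (fun st x => (f, g x) :: st) rest) ((f + 1, sent) :: rest) := by
  refine ⟨↑(rest.map Prod.fst), ↑(xs.reverse.map (fun _ : String => f)), {f + 1}, by simp, ?_, ?_, ?_⟩
  · rw [foldl_cons_eq (fun x => (f, g x)) xs rest]
    simp only [List.map_append, List.map_map, ← Multiset.coe_add]
    rw [add_comm]
    rfl
  · simp only [List.map_cons, ← Multiset.cons_coe]
    rw [add_comm (G := Multiset Nat), Multiset.singleton_add]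
  · intro y hy
    refine ⟨f + 1, by simp, ?_⟩
    have : ¬xs = [] ∧ y = f := by simpa using hy
    omega

-- one Python `stack.append` per element of `reversed(l)`; folded pushes
def splitB_F (tok : String) (stack : List (Nat × String))
    (ih : ∀ y, pvStackRel y stack → List String → List String) : List String → List String :=
  match stack, ih with
  | [], _ => fun res => res
  | (0, sent) :: rest, ih => fun res =>
    if PySem.Str.isIn tok sent = false then ih rest (pvStackRel_pop _ _) (res ++ [sent])
    else ih rest (pvStackRel_pop _ _) res        -- fuel guard; never reached on a real run
  | (Nat.succ f, sent) :: rest, ih => fun res =>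
    if PySem.Str.isIn tok sent = false then ih rest (pvStackRel_pop _ _) (res ++ [sent])
    else
      let temp := (PySem.Str.split? sent tok).getD []
      let l := list_of_conjuncts (PySem.Str.strip (PySem.List.pyGetD temp 1 ""))
      let tail := PySem.Str.join tok (PySem.List.slice temp (some 2) none)
      ih (l.reverse.foldl (fun st x => (f, PySem.List.pyGetD temp 0 "" ++ x ++ tail) :: st) rest)
        (pvStackRel_push _ _ _ _ _) res

def splitB_loop (tok : String) : List (Nat × String) → List String → List String :=
  WellFounded.fix pvStackRel_wf (splitB_F tok)

def split_tree_alt (tree : String) (depth : Int) : List String :=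
  splitB_loop ("[D" ++ PySem.Int.toStr depth ++ "]") [(tree.toList.length + 1, tree)] []

-- ===== PRECONDITION & SPEC =====
def Spec_split_tree (tree : String) (depth : Int) (out : List String) : Prop := out = split_tree_alt tree depth
instance (tree : String) (depth : Int) (out : List String) : Decidable (Spec_split_tree tree depth out) := by unfold Spec_split_tree; infer_instance

-- ===== CLAIM (what is proved, stated in full; the proofs are below) =====
def Claim_equal_split_tree : Prop := ∀ (tree : String) (depth : Int), Dom_split_tree tree depth → Spec_split_tree tree depth (split_tree tree depth)

-- ===== LEMMAS AND PROOFS =====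

theorem splitB_loop_unfold (tok : String) (stack : List (Nat × String)) :
    splitB_loop tok stack = splitB_F tok stack (fun y _ => splitB_loop tok y) :=
  WellFounded.fix_eq pvStackRel_wf (splitB_F tok) stack

theorem loop_nil (tok : String) (res : List String) : splitB_loop tok [] res = res := by
  rw [splitB_loop_unfold]; rfl

theorem loop_out (tok : String) (f : Nat) (sent : String) (rest : List (Nat × String))
    (res : List String) (h : PySem.Str.isIn tok sent = false) :
    splitB_loop tok ((f, sent) :: rest) res = splitB_loop tok rest (res ++ [sent]) := by
  cases f <;> (rw [splitB_loop_unfold]; simp only [splitB_F]; rw [if_pos h])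

theorem loop_zero (tok : String) (sent : String) (rest : List (Nat × String)) (res : List String)
    (h : PySem.Str.isIn tok sent = true) :
    splitB_loop tok ((0, sent) :: rest) res = splitB_loop tok rest res := by
  rw [splitB_loop_unfold]; simp only [splitB_F]; rw [if_neg (by simpa using h)]

theorem loop_expand (tok : String) (f : Nat) (sent : String) (rest : List (Nat × String))
    (res : List String) (h : PySem.Str.isIn tok sent = true) :
    splitB_loop tok ((f + 1, sent) :: rest) res =
      splitB_loop tok
        ((list_of_conjuncts (PySem.Str.strip (PySem.List.pyGetD ((PySem.Str.split? sent tok).getD []) 1 ""))).reverse.foldl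
          (fun st x => (f, PySem.List.pyGetD ((PySem.Str.split? sent tok).getD []) 0 "" ++ x ++
            PySem.Str.join tok (PySem.List.slice ((PySem.Str.split? sent tok).getD []) (some 2) none)) :: st) rest)
        res := by
  rw [splitB_loop_unfold]; simp only [splitB_F]; rw [if_neg (by simpa using h)]

theorem goA_out (tok : String) (fuel : Nat) (t : String) (h : PySem.Str.isIn tok t = false) :
    splitA_go tok fuel t = [t] := by
  have h' : PySem.Chars.isIn tok.toList t.toList = false := by simpa using h
  rw [splitA_go.eq_def]; simp [h']

theorem goA_zero (tok : String) (t : String) (h : PySem.Str.isIn tok t = true) :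
    splitA_go tok 0 t = [] := by
  have h' : PySem.Chars.isIn tok.toList t.toList = true := by simpa using h
  rw [splitA_go.eq_def]; simp [h']

theorem goA_succ (tok : String) (fuel : Nat) (t : String) (h : PySem.Str.isIn tok t = true) :
    splitA_go tok (fuel + 1) t =
      ((list_of_conjuncts (PySem.Str.strip (PySem.List.pyGetD ((PySem.Str.split? t tok).getD []) 1 ""))).map
        (fun x => PySem.List.pyGetD ((PySem.Str.split? t tok).getD []) 0 "" ++ x ++
          PySem.Str.join tok (PySem.List.slice ((PySem.Str.split? t tok).getD []) (some 2) none))).flatMap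
        (fun s => splitA_go tok fuel s) := by
  have h' : PySem.Chars.isIn tok.toList t.toList = true := by simpa using h
  rw [splitA_go.eq_def]; simp [h']

theorem loop_block (tok : String) (f : Nat)
    (hih : ∀ (s : String) (rest : List (Nat × String)) (res : List String),
      splitB_loop tok ((f, s) :: rest) res = splitB_loop tok rest (res ++ splitA_go tok f s)) :
    ∀ (xs : List String) (g : String → String) (rest : List (Nat × String)) (res : List String),
      splitB_loop tok ((xs.map (fun x => (f, g x))) ++ rest) res =
        splitB_loop tok rest (res ++ (xs.map g).flatMap (fun s => splitA_go tok f s)) := by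
  intro xs
  induction xs with
  | nil => intro g rest res; simp
  | cons x xs ih =>
    intro g rest res
    simp only [List.map_cons, List.cons_append, List.flatMap_cons]
    rw [hih, ih, List.append_assoc]

theorem loop_go (tok : String) :
    ∀ (f : Nat) (s : String) (rest : List (Nat × String)) (res : List String),
      splitB_loop tok ((f, s) :: rest) res = splitB_loop tok rest (res ++ splitA_go tok f s) := by
  intro f
  induction f with
  | zero =>
    intro s rest res
    by_cases h : PySem.Str.isIn tok s = false
    · rw [loop_out tok _ _ _ _ h, goA_out tok _ _ h]
    · rw [Bool.not_eq_false] at h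
      rw [loop_zero tok _ _ _ h, goA_zero tok _ h]; simp
  | succ f ihf =>
    intro s rest res
    by_cases h : PySem.Str.isIn tok s = false
    · rw [loop_out tok _ _ _ _ h, goA_out tok _ _ h]
    · rw [Bool.not_eq_false] at h
      rw [loop_expand tok f s rest res h, goA_succ tok f s h]
      rw [foldl_cons_eq, List.reverse_reverse]
      exact loop_block tok f ihf _ _ rest res

-- ===== VERDICT (by name: the statement is the Claim_ definition above) =====
theorem split_tree_spec : Claim_equal_split_tree := by
  intro tree depth _
  unfold Spec_split_tree split_tree split_tree_alt
  rw [loop_go, loop_nil]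
  simp
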